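-- pv_equiv track=rewrite | github.com/faizanwasif/PythonAssigments | TA TASK$4/a04.py | mostTouchableLocker
-- ===== SOURCE A (Python) =====
-- def mostTouchableLocker(number_of_lockers , number_of_students):### YOUR CODE FOR mostTouchableLocker() FUNCTION GOES HERE ###
--     if number_of_students == 0:
--         return 0
--     if (number_of_lockers or number_of_students) < 0:
--         return None
--
--     a = 0
--     for i in range(1, number_of_lockers + 1):
--         for z in range(1, number_of_students+1):
--             if i % number_of_students == 0:
--                 a += 1
--
--     return(a)
-- ===== SOURCE B (Python) =====
-- def mostTouchableLocker(number_of_lockers, number_of_students):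
--     # Closed form: with s students, lockers s, 2s, 3s, ... are each touched s times.
--     if number_of_students == 0:
--         return 0
--     if number_of_lockers < 0 or number_of_students < 0:
--         return None
--     return number_of_students * (number_of_lockers // number_of_students)
-- ===== Notes on version B (the rewrite author's own statement) =====
-- stated objective: faster
-- what changed: Replaces the O(lockers*students) double loop counting multiples with the closed form students*(lockers//students), and fixes the broken '(a or b) < 0' negativity guard.
-- intended difference: When number_of_lockers > 0 and number_of_students < 0, A's guard '(number_of_lockers or number_of_students) < 0' fails to reject the negative student count and A returns 0 from an empty loop; B returns None, the intended rejection of a negative count. — e.g. on mostTouchableLocker(5, -2): A returns some 0, B returns none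
import Mathlib
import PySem

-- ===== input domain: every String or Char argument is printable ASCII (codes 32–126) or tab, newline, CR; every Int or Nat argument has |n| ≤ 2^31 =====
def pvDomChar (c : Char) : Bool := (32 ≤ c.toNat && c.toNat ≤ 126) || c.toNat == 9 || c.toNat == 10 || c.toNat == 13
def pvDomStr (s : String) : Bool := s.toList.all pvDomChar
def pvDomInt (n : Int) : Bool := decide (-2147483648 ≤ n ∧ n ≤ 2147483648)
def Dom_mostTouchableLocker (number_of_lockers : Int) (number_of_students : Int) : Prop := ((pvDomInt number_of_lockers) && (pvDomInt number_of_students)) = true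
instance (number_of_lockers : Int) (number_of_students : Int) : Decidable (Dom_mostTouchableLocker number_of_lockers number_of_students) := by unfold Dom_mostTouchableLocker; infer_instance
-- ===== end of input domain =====

-- B replaces A's O(lockers*students) double counting loop with the O(1) closed form
-- students*(lockers//students) and rejects any negative argument (see D_ below).

-- ===== PORT A =====
def mostTouchableLocker (number_of_lockers : Int) (number_of_students : Int) : Option Int :=
  if number_of_students = 0 then some 0
  else if (if number_of_lockers ≠ 0 then number_of_lockers else number_of_students) < 0 then none
  else
    some ((PySem.List.pyRange 1 (number_of_lockers + 1) 1).foldl (fun a i =>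
      (PySem.List.pyRange 1 (number_of_students + 1) 1).foldl (fun a _z =>
        if PySem.Int.mod i number_of_students = 0 then a + 1 else a) a) 0)

-- ===== PORT B =====
def mostTouchableLocker_alt (number_of_lockers : Int) (number_of_students : Int) : Option Int :=
  if number_of_students = 0 then some 0
  else if number_of_lockers < 0 ∨ number_of_students < 0 then none
  else some (number_of_students * PySem.Int.floordiv number_of_lockers number_of_students)

-- ===== PRECONDITION & SPEC =====
-- When number_of_lockers > 0 and number_of_students < 0, A's guard
-- '(number_of_lockers or number_of_students) < 0' fails to reject the negative student
-- count and A returns 0 from an empty loop; B returns None, the intended rejection.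
def D_mostTouchableLocker (number_of_lockers : Int) (number_of_students : Int) : Prop :=
  0 < number_of_lockers ∧ number_of_students < 0
instance (number_of_lockers : Int) (number_of_students : Int) : Decidable (D_mostTouchableLocker number_of_lockers number_of_students) := by unfold D_mostTouchableLocker; infer_instance

def Spec_mostTouchableLocker (number_of_lockers : Int) (number_of_students : Int) (out : Option Int) : Prop := ¬ D_mostTouchableLocker number_of_lockers number_of_students → out = mostTouchableLocker_alt number_of_lockers number_of_students
instance (number_of_lockers : Int) (number_of_students : Int) (out : Option Int) : Decidable (Spec_mostTouchableLocker number_of_lockers number_of_students out) := by unfold Spec_mostTouchableLocker; infer_instance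

def pvDiffWitness_mostTouchableLocker : Int × Int := (5, -2)
def pvDiffWitnessOut_mostTouchableLocker : (Option Int) × (Option Int) := (some 0, none)

-- ===== CLAIM (what is proved, stated in full; the proofs are below) =====
def Claim_unchanged_mostTouchableLocker : Prop := ∀ (number_of_lockers : Int) (number_of_students : Int), Dom_mostTouchableLocker number_of_lockers number_of_students → Spec_mostTouchableLocker number_of_lockers number_of_students (mostTouchableLocker number_of_lockers number_of_students)
def Claim_changed_mostTouchableLocker : Prop := Dom_mostTouchableLocker (pvDiffWitness_mostTouchableLocker.1) (pvDiffWitness_mostTouchableLocker.2) ∧ D_mostTouchableLocker (pvDiffWitness_mostTouchableLocker.1) (pvDiffWitness_mostTouchableLocker.2) ∧ mostTouchableLocker (pvDiffWitness_mostTouchableLocker.1) (pvDiffWitness_mostTouchableLocker.2) = pvDiffWitnessOut_mostTouchableLocker.1 ∧ mostTouchableLocker_alt (pvDiffWitness_mostTouchableLocker.1) (pvDiffWitness_mostTouchableLocker.2) = pvDiffWitnessOut_mostTouchableLocker.2 ∧ pvDiffWitnessOut_mostTouchableLocker.1 ≠ pvDiffWitnessOut_mostTouchableLocker.2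
def Claim_exact_mostTouchableLocker : Prop := ∀ (number_of_lockers : Int) (number_of_students : Int), Dom_mostTouchableLocker number_of_lockers number_of_students → D_mostTouchableLocker number_of_lockers number_of_students → mostTouchableLocker number_of_lockers number_of_students ≠ mostTouchableLocker_alt number_of_lockers number_of_students

-- ===== LEMMAS AND PROOFS =====

-- The inner z-loop ignores z: it adds the list length when the condition holds.
theorem pv_inner_fold (P : Prop) [Decidable P] (l : List Int) (a : Int) :
    l.foldl (fun a _z => if P then a + 1 else a) a = a + (if P then (l.length : Int) else 0) := by
  induction l generalizing a with
  | nil => simp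
  | cons x xs ih =>
    simp only [List.foldl_cons, ih, List.length_cons]
    split_ifs <;> push_cast <;> ring

theorem pv_fold_id (l : List Int) (x : Int) : l.foldl (fun a _i => a) x = x := by
  induction l <;> simp_all

-- A's double loop over lockers 1..n equals s * (n / s) for a positive student count s.
theorem pv_main (s : Nat) (hs : 0 < s) (n : Nat) :
    (PySem.List.pyRange 1 ((n : Int) + 1) 1).foldl (fun a i =>
      (PySem.List.pyRange 1 ((s : Int) + 1) 1).foldl (fun a _z =>
        if PySem.Int.mod i (s : Int) = 0 then a + 1 else a) a) 0
    = (s : Int) * ((n / s : Nat) : Int) := by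
  induction n with
  | zero => simp [PySem.List.pyRange_one_eq_nil]
  | succ n ih =>
    have hsplit : PySem.List.pyRange 1 ((↑(n+1) : Int) + 1) 1
        = PySem.List.pyRange 1 ((n : Int) + 1) 1 ++ [(n : Int) + 1] := by
      have hc : ((n + 1 : Nat) : Int) + 1 = ((n : Int) + 1) + 1 := by push_cast; ring
      rw [hc]
      exact PySem.List.pyRange_one_succ_right (by omega)
    rw [hsplit, List.foldl_append, ih]
    simp only [List.foldl_cons, List.foldl_nil]
    rw [pv_inner_fold]
    have hlen : ((PySem.List.pyRange 1 ((s : Int) + 1) 1).length : Int) = (s : Int) := by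
      rw [PySem.List.length_pyRange_one]; omega
    rw [hlen]
    have hdvd : PySem.Int.mod ((n : Int) + 1) (s : Int) = 0 ↔ (s : Int) ∣ ((n : Int) + 1) :=
      PySem.Int.mod_eq_zero_iff_dvd _ _
    have hnat : ((s : Int) ∣ ((n : Int) + 1)) ↔ s ∣ (n + 1) := by
      constructor <;> intro h <;> exact_mod_cast h
    rw [Nat.succ_div]
    by_cases hd : s ∣ (n + 1)
    · rw [if_pos ((hdvd.trans hnat).mpr hd), if_pos hd]; push_cast; ring
    · rw [if_neg (fun h => hd ((hdvd.trans hnat).mp h)), if_neg hd]; push_cast; ring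

-- ===== VERDICT (by name: the statement is the Claim_ definition above) =====
theorem mostTouchableLocker_spec : Claim_unchanged_mostTouchableLocker := by
  intro L S _ hnD
  by_cases hS0 : S = 0
  · simp [mostTouchableLocker, mostTouchableLocker_alt, hS0]
  · rcases lt_trichotomy S 0 with hS | hS | hS
    · -- S < 0: outside D_ forces L ≤ 0
      have hL : L ≤ 0 := by
        by_contra h; exact hnD ⟨by omega, hS⟩
      rcases eq_or_lt_of_le hL with hL0 | hL0
      · -- L = 0: guard picks S, both none
        subst hL0
        simp [mostTouchableLocker, mostTouchableLocker_alt, hS0, hS]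
      · -- L < 0: both none
        simp only [mostTouchableLocker, mostTouchableLocker_alt, if_neg hS0]
        rw [if_pos (by rw [if_pos (by omega : L ≠ 0)]; omega),
          if_pos (by omega : L < 0 ∨ S < 0)]
    · exact absurd hS hS0
    · -- S > 0
      rcases lt_or_ge L 0 with hL | hL
      · simp only [mostTouchableLocker, mostTouchableLocker_alt, if_neg hS0]
        rw [if_pos (by rw [if_pos (by omega : L ≠ 0)]; omega),
          if_pos (by omega : L < 0 ∨ S < 0)]
      · -- 0 ≤ L, 0 < S: the double loop equals the closed form
        have hLc : L = ((L.toNat : Nat) : Int) := by omega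
        have hSc : S = ((S.toNat : Nat) : Int) := by omega
        have h := pv_main S.toNat (by omega) L.toNat
        rw [← hSc, ← hLc] at h
        have hfd : PySem.Int.floordiv L S = ((L.toNat / S.toNat : Nat) : Int) := by
          rw [hLc, hSc]; exact_mod_cast PySem.Int.floordiv_natCast _ _
        have hg : ¬ ((if L ≠ 0 then L else S) < 0) := by
          by_cases hL0 : L = 0 <;> simp [hL0] <;> omega
        simp only [mostTouchableLocker, mostTouchableLocker_alt, if_neg hS0, if_neg hg,
          if_neg (by omega : ¬ (L < 0 ∨ S < 0))]
        rw [h, hfd, hSc]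

theorem mostTouchableLocker_changed : Claim_changed_mostTouchableLocker := by
  unfold Claim_changed_mostTouchableLocker; decide

theorem mostTouchableLocker_tight : Claim_exact_mostTouchableLocker := by
  intro L S _ hD
  obtain ⟨hL, hS⟩ := hD
  have hA : mostTouchableLocker L S = some 0 := by
    unfold mostTouchableLocker
    rw [if_neg (by omega : ¬ S = 0)]
    have hg : (if L ≠ 0 then L else S) = L := if_pos (by omega)
    rw [hg, if_neg (by omega : ¬ L < 0)]
    have hin : PySem.List.pyRange 1 (S + 1) 1 = [] :=
      PySem.List.pyRange_one_eq_nil (by omega)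
    rw [hin]
    simp only [List.foldl_nil]
    rw [pv_fold_id]
  have hB : mostTouchableLocker_alt L S = none := by
    unfold mostTouchableLocker_alt
    rw [if_neg (by omega : ¬ S = 0), if_pos (Or.inr hS)]
  simp [hA, hB]
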